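-- pv_equiv track=rewrite | github.com/rujultelavane/TIP101 | session6.py | partition_label
-- ===== SOURCE A (Python) =====
-- def partition_label(s):
--     has_char = {}
--
--     for i in range(len(s)):
--         has_char[s[i]] = i
--
--     result = []
--     start = 0
--     end = 0
--
--     for i in range(len(s)):
--         char = s[i]
--
--         if has_char[char] > end:
--             end = has_char[char]
--
--         if i == end:
--             size = end - start + 1
--             result.append(size)
--             start = i + 1
--     return result
-- ===== SOURCE B (Python) =====
-- def partition_label(s):
--     n = len(s)
--     cuts = [i + 1 for i in range(n) if set(s[:i + 1]).isdisjoint(s[i + 1:])]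
--     return [b - a for a, b in zip([0] + cuts, cuts)]
-- ===== Notes on version B (the rewrite author's own statement) =====
-- stated objective: simpler
-- what changed: B drops the last-occurrence dict and the running-max/start/end scan: it marks a cut after index i exactly when the set of characters seen so far is disjoint from the rest of the string, then returns the differences of consecutive cut positions.
import Mathlib
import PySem

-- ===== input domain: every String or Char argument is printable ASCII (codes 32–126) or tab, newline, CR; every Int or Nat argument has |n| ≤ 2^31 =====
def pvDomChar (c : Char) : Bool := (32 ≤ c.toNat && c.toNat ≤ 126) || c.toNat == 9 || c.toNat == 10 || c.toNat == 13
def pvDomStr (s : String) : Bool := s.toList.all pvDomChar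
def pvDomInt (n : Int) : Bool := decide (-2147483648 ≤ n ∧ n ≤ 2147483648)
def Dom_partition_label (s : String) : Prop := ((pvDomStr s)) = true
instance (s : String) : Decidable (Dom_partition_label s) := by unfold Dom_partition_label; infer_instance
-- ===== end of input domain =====

-- B replaces A's last-occurrence dict and running-max start/end scan by a direct
-- prefix/suffix disjointness cut test plus differences of cut positions (simpler, not faster).

-- ===== PORT A =====
-- Literal port of A; s[i] is rendered as cs.getD i ' ' (i always in range, so exact).
def partition_label (s : String) : List Int :=
  let cs := s.toList
  let has_char : PySem.Dict Char Int :=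
    (List.range cs.length).foldl (fun d i => d.insert (cs.getD i ' ') (i : Int)) PySem.Dict.empty
  let st :=
    (List.range cs.length).foldl (fun (st : List Int × Int × Int) i =>
      let result := st.1
      let start := st.2.1
      let endv := st.2.2
      let char := cs.getD i ' '
      -- key lookup: char was inserted by the first loop, so the default 0 is never used
      let h := has_char.getD char 0
      let endv := if endv < h then h else endv
      if (i : Int) = endv then (result ++ [endv - start + 1], ((i : Int) + 1, endv))
      else (result, (start, endv))) ([], (0, 0))
  st.1

-- ===== PORT B =====
def partition_label_alt (s : String) : List Int :=
  let cs := s.toList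
  let cuts : List Int :=
    ((List.range cs.length).filter
        (fun i => (cs.take (i + 1)).all (fun c => !((cs.drop (i + 1)).contains c)))).map
      (fun (i : Nat) => ((i : Int) + 1))
  (((0 : Int) :: cuts).zip cuts).map (fun p => p.2 - p.1)

-- ===== PRECONDITION & SPEC =====
def Spec_partition_label (s : String) (out : List Int) : Prop := out = partition_label_alt s
instance (s : String) (out : List Int) : Decidable (Spec_partition_label s out) := by unfold Spec_partition_label; infer_instance

-- ===== CLAIM (what is proved, stated in full; the proofs are below) =====
def Claim_equal_partition_label : Prop := ∀ (s : String), Dom_partition_label s → Spec_partition_label s (partition_label s)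

-- ===== LEMMAS AND PROOFS =====

-- last index of c among the first m characters of cs (0 when absent)
def lastIn (cs : List Char) : Nat → Char → Int
  | 0, _ => 0
  | m + 1, c => if cs.getD m ' ' = c then (m : Int) else lastIn cs m c

theorem dict_getD_eq_lastIn (cs : List Char) (m : Nat) (c : Char) :
    (((List.range m).foldl (fun d i => d.insert (cs.getD i ' ') (i : Int))
        PySem.Dict.empty).getD c 0) = lastIn cs m c := by
  induction m with
  | zero => simp [lastIn, PySem.Dict.getD_empty]
  | succ m ih =>
    rw [List.range_succ, List.foldl_append]
    simp only [List.foldl_cons, List.foldl_nil, lastIn]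
    rw [PySem.Dict.getD_insert]
    split_ifs with h1 h2 h2
    · rfl
    · exact absurd h1.symm h2
    · exact absurd h2.symm h1
    · exact ih

theorem lastIn_ge (cs : List Char) (m j : Nat) (c : Char) (hj : j < m)
    (hc : cs.getD j ' ' = c) : (j : Int) ≤ lastIn cs m c := by
  induction m with
  | zero => omega
  | succ m ih =>
    simp only [lastIn]
    rcases Nat.lt_succ_iff_lt_or_eq.mp hj with h | h
    · split_ifs with he
      · exact_mod_cast Nat.le_of_lt h
      · exact ih h
    · subst h
      split_ifs
      · exact le_refl _

theorem lastIn_occ (cs : List Char) (m : Nat) (c : Char) :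
    lastIn cs m c = 0 ∨ ∃ k < m, (k : Int) = lastIn cs m c ∧ cs.getD k ' ' = c := by
  induction m with
  | zero => left; rfl
  | succ m ih =>
    simp only [lastIn]
    split_ifs with he
    · right; exact ⟨m, Nat.lt_succ_self m, rfl, he⟩
    · rcases ih with h | ⟨k, hk, hv, hc⟩
      · left; exact h
      · right; exact ⟨k, Nat.lt_succ_of_lt hk, hv, hc⟩

-- the running maximum A keeps in `end`
def endAcc (cs : List Char) : Nat → Int
  | 0 => 0
  | i + 1 =>
    let h := lastIn cs cs.length (cs.getD i ' ')
    if endAcc cs i < h then h else endAcc cs i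

theorem endAcc_le_iff (cs : List Char) (i : Nat) (t : Int) (ht : 0 ≤ t) :
    endAcc cs i ≤ t ↔ ∀ j < i, lastIn cs cs.length (cs.getD j ' ') ≤ t := by
  induction i with
  | zero => simp [endAcc, ht]
  | succ i ih =>
    simp only [endAcc]
    constructor
    · intro h j hj
      rcases Nat.lt_succ_iff_lt_or_eq.mp hj with hj' | hj'
      · exact (ih.mp (by split_ifs at h <;> omega)) j hj'
      · subst hj'; split_ifs at h <;> omega
    · intro h
      have h1 := ih.mpr (fun j hj => h j (Nat.lt_succ_of_lt hj))
      have h2 := h i (Nat.lt_succ_self i)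
      split_ifs <;> omega

-- membership in the suffix, via indices
theorem mem_drop_iff (cs : List Char) (i : Nat) (c : Char) :
    c ∈ cs.drop (i + 1) ↔ ∃ k, i + 1 ≤ k ∧ k < cs.length ∧ cs.getD k ' ' = c := by
  constructor
  · intro h
    rcases List.mem_iff_getElem.mp h with ⟨j, hj, he⟩
    refine ⟨i + 1 + j, by omega, by have := hj; simp [List.length_drop] at this; omega, ?_⟩
    rw [List.getElem_drop] at he
    rw [List.getD_eq_getElem cs ' ' (by simp [List.length_drop] at hj; omega)]
    exact he
  · rintro ⟨k, hk1, hk2, hk3⟩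
    rw [List.getD_eq_getElem cs ' ' hk2] at hk3
    apply List.mem_iff_getElem.mpr
    exact ⟨k - (i + 1), by simp [List.length_drop]; omega, by rw [List.getElem_drop]; rw [← hk3]; congr 1; omega⟩

-- A's cut test equals B's cut test
theorem test_eq (cs : List Char) (i : Nat) (hi : i < cs.length) :
    ((i : Int) = endAcc cs (i + 1)) ↔
      ((cs.take (i + 1)).all (fun c => !((cs.drop (i + 1)).contains c)) = true) := by
  have hge : (i : Int) ≤ endAcc cs (i + 1) := by
    simp only [endAcc]
    have := lastIn_ge cs cs.length i (cs.getD i ' ') hi rfl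
    split_ifs <;> omega
  have hiff := endAcc_le_iff cs (i + 1) (i : Int) (by positivity)
  rw [show ((i : Int) = endAcc cs (i + 1)) ↔ endAcc cs (i + 1) ≤ (i : Int) by omega, hiff]
  rw [List.all_eq_true]
  constructor
  · intro h c hc
    simp only [List.contains_eq_mem, Bool.not_eq_true', decide_eq_false_iff_not]
    intro hmem
    rcases List.mem_iff_getElem.mp hc with ⟨j, hj, he⟩
    have hjlen : j < cs.length := lt_of_lt_of_le hj (by simp [List.length_take])
    rw [List.getElem_take] at he
    have hji : j < i + 1 := by simp [List.length_take] at hj; omega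
    have h1 := h j hji
    rw [List.getD_eq_getElem cs ' ' hjlen, he] at h1
    rcases mem_drop_iff cs i c |>.mp hmem with ⟨k, hk1, hk2, hk3⟩
    have := lastIn_ge cs cs.length k c hk2 hk3
    omega
  · intro h j hj
    by_contra hgt
    rw [not_le] at hgt
    set c := cs.getD j ' ' with hc
    rcases lastIn_occ cs cs.length c with h0 | ⟨k, hk, hv, hkc⟩
    · omega
    · have hkk : i + 1 ≤ k := by omega
      have hjlen : j < cs.length := by omega
      have hcmem : c ∈ cs.take (i + 1) := by
        apply List.mem_iff_getElem.mpr
        exact ⟨j, by simp [List.length_take]; omega, by rw [List.getElem_take]; rw [hc, List.getD_eq_getElem cs ' ' hjlen]⟩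
      have := h c hcmem
      rw [Bool.not_eq_eq_eq_not, Bool.not_true, List.contains_eq_mem, decide_eq_false_iff_not] at this
      exact this ((mem_drop_iff cs i c).mpr ⟨k, hkk, hk, hkc⟩)

def cutsUpTo (cs : List Char) (k : Nat) : List Int :=
  (((List.range k).filter
      (fun i => (cs.take (i + 1)).all (fun c => !((cs.drop (i + 1)).contains c)))).map
    (fun (i : Nat) => ((i : Int) + 1)))

def diffs (a : Int) (l : List Int) : List Int := ((a :: l).zip l).map (fun p => p.2 - p.1)

theorem diffs_append (a x : Int) (l : List Int) :
    diffs a (l ++ [x]) = diffs a l ++ [x - l.getLastD a] := by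
  induction l generalizing a with
  | nil => simp [diffs]
  | cons y l ih =>
    rw [List.getLastD_cons]
    simpa [diffs] using ih y

theorem loop_inv (cs : List Char) (k : Nat) (hk : k ≤ cs.length) :
    ((List.range k).foldl (fun (st : List Int × Int × Int) i =>
      let result := st.1
      let start := st.2.1
      let endv := st.2.2
      let char := cs.getD i ' '
      let h := (((List.range cs.length).foldl
          (fun d i => d.insert (cs.getD i ' ') (i : Int)) PySem.Dict.empty)).getD char 0
      let endv := if endv < h then h else endv
      if (i : Int) = endv then (result ++ [endv - start + 1], ((i : Int) + 1, endv))
      else (result, (start, endv))) ([], (0, 0))) =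
    (diffs 0 (cutsUpTo cs k), ((cutsUpTo cs k).getLastD 0, endAcc cs k)) := by
  induction k with
  | zero => simp [diffs, cutsUpTo, endAcc]
  | succ k ih =>
    have hk' : k < cs.length := hk
    rw [List.range_succ, List.foldl_append, ih (Nat.le_of_lt hk')]
    simp only [List.foldl_cons, List.foldl_nil, dict_getD_eq_lastIn]
    have hend : (if endAcc cs k < lastIn cs cs.length (cs.getD k ' ')
        then lastIn cs cs.length (cs.getD k ' ') else endAcc cs k) = endAcc cs (k + 1) := rfl
    rw [hend]
    by_cases hP : ((cs.take (k + 1)).all (fun c => !((cs.drop (k + 1)).contains c)) = true)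
    · have hcuts : cutsUpTo cs (k + 1) = cutsUpTo cs k ++ [(k : Int) + 1] := by
        simp only [cutsUpTo, List.range_succ, List.filter_append]
        simp
        simpa using hP
      have hA : (k : Int) = endAcc cs (k + 1) := (test_eq cs k hk').mpr hP
      rw [if_pos hA, hcuts, diffs_append, List.getLastD_concat, ← hA]
      have harith : (k : Int) - (cutsUpTo cs k).getLastD 0 + 1 =
          (k : Int) + 1 - (cutsUpTo cs k).getLastD 0 := by ring
      rw [harith]
    · have hcuts : cutsUpTo cs (k + 1) = cutsUpTo cs k := by
        simp only [cutsUpTo, List.range_succ, List.filter_append]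
        simp
        simpa using hP
      have hA : ¬ ((k : Int) = endAcc cs (k + 1)) := fun h => hP ((test_eq cs k hk').mp h)
      rw [if_neg hA, hcuts]

-- ===== VERDICT (by name: the statement is the Claim_ definition above) =====
theorem partition_label_spec : Claim_equal_partition_label := by
  intro s _
  unfold Spec_partition_label
  show partition_label s = partition_label_alt s
  simp only [partition_label, partition_label_alt]
  rw [loop_inv s.toList s.toList.length (le_refl _)]
  rfl
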